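-- pv_equiv track=rewrite | github.com/linenmin/MCUFlowNet | EdgeFlowNAS/efnas/nas/supernet_v2_rank_consistency.py | build_fc2_eval_windows
-- ===== SOURCE A (Python) =====
-- from typing import Any, Dict, Iterable, List, Optional, Sequence, Tuple
--
-- def build_fc2_eval_windows(num_samples: int, batch_size: int, max_samples: Optional[int] = None) -> List[Tuple[int, int]]:
--     """Build sequential FC2 eval windows that cover each chosen sample exactly once."""
--     total = max(0, int(num_samples))
--     bs = max(1, int(batch_size))
--     if max_samples is not None:
--         total = min(total, max(0, int(max_samples)))
--     windows: List[Tuple[int, int]] = []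
--     offset = 0
--     while offset < total:
--         current_bs = min(bs, total - offset)
--         windows.append((int(offset), int(current_bs)))
--         offset += current_bs
--     return windows
-- ===== SOURCE B (Python) =====
-- from typing import List, Optional, Tuple
--
--
-- def build_fc2_eval_windows(num_samples: int, batch_size: int, max_samples: Optional[int] = None) -> List[Tuple[int, int]]:
--     """Compute the partition up front: q full windows of size bs plus one remainder window."""
--     total = max(0, int(num_samples))
--     bs = max(1, int(batch_size))
--     if max_samples is not None:
--         total = min(total, max(0, int(max_samples)))
--     q, r = divmod(total, bs)
--     windows = [(i * bs, bs) for i in range(q)]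
--     if r:
--         windows.append((q * bs, r))
--     return windows
-- ===== Notes on version B (the rewrite author's own statement) =====
-- stated objective: alternative
-- what changed: Replaces the running while-loop (offset accumulator with per-step min(bs, total-offset)) by an up-front divmod split: q uniform windows built by a comprehension plus an optional remainder window.
import Mathlib
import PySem

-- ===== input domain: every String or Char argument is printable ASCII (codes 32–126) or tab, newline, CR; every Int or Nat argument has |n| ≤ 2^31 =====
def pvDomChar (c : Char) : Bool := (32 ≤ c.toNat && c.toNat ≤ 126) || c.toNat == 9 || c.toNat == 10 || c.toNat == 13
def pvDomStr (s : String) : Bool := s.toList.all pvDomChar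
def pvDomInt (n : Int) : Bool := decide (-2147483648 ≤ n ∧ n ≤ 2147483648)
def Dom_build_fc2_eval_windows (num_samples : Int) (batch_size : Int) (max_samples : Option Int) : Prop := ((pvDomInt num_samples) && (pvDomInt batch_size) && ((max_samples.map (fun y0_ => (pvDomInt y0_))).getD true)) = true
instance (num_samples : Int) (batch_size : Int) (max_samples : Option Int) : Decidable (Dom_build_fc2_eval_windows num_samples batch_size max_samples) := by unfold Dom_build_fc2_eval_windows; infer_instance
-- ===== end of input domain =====

-- B replaces A's running while-loop by an up-front divmod split (q full windows + optional remainder); same output, similar cost.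

-- ===== PORT A =====
-- A's while-loop: emits (offset, min bs (total-offset)) and advances offset; hb guarantees progress (A's bs is max 1 … ≥ 1).
def buildLoopA (total : Int) (bs : Int) (hb : 1 ≤ bs) (offset : Int) : List (Int × Int) :=
  if h : offset < total then
    (offset, min bs (total - offset)) :: buildLoopA total bs hb (offset + min bs (total - offset))
  else []
termination_by (total - offset).toNat
decreasing_by omega

def build_fc2_eval_windows (num_samples : Int) (batch_size : Int) (max_samples : Option Int) : List (Int × Int) :=
  let total := max 0 num_samples
  let bs := max 1 batch_size
  let total := match max_samples with
    | some m => min total (max 0 m)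
    | none => total
  buildLoopA total bs (le_max_left 1 batch_size) 0

-- ===== PORT B =====
def build_fc2_eval_windows_alt (num_samples : Int) (batch_size : Int) (max_samples : Option Int) : List (Int × Int) :=
  let total := max 0 num_samples
  let bs := max 1 batch_size
  let total := match max_samples with
    | some m => min total (max 0 m)
    | none => total
  let q := PySem.Int.floordiv total bs
  let r := PySem.Int.mod total bs
  let windows := (PySem.List.pyRange 0 q 1).map (fun i => (i * bs, bs))
  if r ≠ 0 then windows ++ [(q * bs, r)] else windows

-- ===== PRECONDITION & SPEC =====
def Spec_build_fc2_eval_windows (num_samples : Int) (batch_size : Int) (max_samples : Option Int) (out : List (Int × Int)) : Prop := out = build_fc2_eval_windows_alt num_samples batch_size max_samples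
instance (num_samples : Int) (batch_size : Int) (max_samples : Option Int) (out : List (Int × Int)) : Decidable (Spec_build_fc2_eval_windows num_samples batch_size max_samples out) := by unfold Spec_build_fc2_eval_windows; infer_instance

-- ===== CLAIM (what is proved, stated in full; the proofs are below) =====
def Claim_equal_build_fc2_eval_windows : Prop := ∀ (num_samples : Int) (batch_size : Int) (max_samples : Option Int), Dom_build_fc2_eval_windows num_samples batch_size max_samples → Spec_build_fc2_eval_windows num_samples batch_size max_samples (build_fc2_eval_windows num_samples batch_size max_samples)

-- ===== LEMMAS AND PROOFS =====

-- A's loop starting at `offset` on a remaining span of q*bs + r: q full windows then the remainder.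
theorem buildLoopA_eq (q : Nat) : ∀ (bs r offset : Int) (hb : 1 ≤ bs), 0 ≤ r → r < bs →
    buildLoopA (offset + (q : Int) * bs + r) bs hb offset =
      ((List.range q).map (fun (i : Nat) => (offset + (i : Int) * bs, bs))) ++
        (if r ≠ 0 then [(offset + (q : Int) * bs, r)] else []) := by
  induction q with
  | zero =>
    intro bs r offset hb hr0 hrb
    by_cases hr : r = 0
    · subst hr
      rw [buildLoopA]
      simp
    · rw [buildLoopA]
      have hlt : offset < offset + ((0 : Nat) : Int) * bs + r := by push_cast; omega
      rw [dif_pos hlt]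
      have hmin : min bs (offset + ((0 : Nat) : Int) * bs + r - offset) = r := by push_cast; omega
      rw [hmin]
      rw [buildLoopA]
      have hstop : ¬ (offset + r < offset + ((0 : Nat) : Int) * bs + r) := by push_cast; omega
      rw [dif_neg hstop]
      simp [hr]
  | succ q ih =>
    intro bs r offset hb hr0 hrb
    have hqb : 0 ≤ (q : Int) * bs := by positivity
    rw [buildLoopA]
    have hlt : offset < offset + ((q + 1 : Nat) : Int) * bs + r := by push_cast; nlinarith
    rw [dif_pos hlt]
    have hmin : min bs (offset + ((q + 1 : Nat) : Int) * bs + r - offset) = bs := by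
      apply min_eq_left; push_cast; nlinarith
    rw [hmin]
    rw [show offset + ((q + 1 : Nat) : Int) * bs + r = (offset + bs) + (q : Int) * bs + r from by push_cast; ring]
    rw [ih bs r (offset + bs) hb hr0 hrb]
    rw [List.range_succ_eq_map]
    simp only [List.map_cons, List.map_map, Nat.cast_zero, zero_mul, add_zero, List.cons_append]
    congr 1
    congr 1
    · apply List.map_congr_left
      intro i _
      simp only [Function.comp_apply]
      push_cast; ring_nf
    · push_cast
      rw [show offset + bs + (q : Int) * bs = offset + ((q : Int) + 1) * bs from by ring]

-- The closed divmod form B computes equals A's loop from offset 0.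
theorem loop_closed (total bs : Int) (hb : 1 ≤ bs) (ht : 0 ≤ total) :
    buildLoopA total bs hb 0 =
      (if PySem.Int.mod total bs ≠ 0 then
        ((PySem.List.pyRange 0 (PySem.Int.floordiv total bs) 1).map (fun i => (i * bs, bs))) ++
          [(PySem.Int.floordiv total bs * bs, PySem.Int.mod total bs)]
      else ((PySem.List.pyRange 0 (PySem.Int.floordiv total bs) 1).map (fun i => (i * bs, bs)))) := by
  have hbpos : (0 : Int) < bs := by omega
  have hfd : PySem.Int.floordiv total bs = total / bs := by
    show total.fdiv bs = total / bs
    simp [Int.fdiv_eq_ediv, le_of_lt hbpos]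
  have hmd : PySem.Int.mod total bs = total % bs := by
    show total.fmod bs = total % bs
    simp [Int.fmod_eq_emod, le_of_lt hbpos]
  have hq0 : 0 ≤ total / bs := Int.ediv_nonneg ht (le_of_lt hbpos)
  have hr0 : 0 ≤ total % bs := Int.emod_nonneg total (by omega)
  have hrb : total % bs < bs := Int.emod_lt_of_pos total hbpos
  have hcast : ((total / bs).toNat : Int) = total / bs := Int.toNat_of_nonneg hq0
  have hdecomp : total = (0 : Int) + ((total / bs).toNat : Int) * bs + total % bs := by
    rw [hcast]
    have h := Int.mul_ediv_add_emod total bs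
    linarith [h, mul_comm bs (total / bs)]
  rw [hfd, hmd]
  rw [show buildLoopA total bs hb 0 =
        buildLoopA ((0 : Int) + ((total / bs).toNat : Int) * bs + total % bs) bs hb 0 from by rw [← hdecomp]]
  rw [buildLoopA_eq (total / bs).toNat bs (total % bs) 0 hb hr0 hrb]
  rw [PySem.List.pyRange_one, Int.sub_zero, List.map_map]
  have hm : List.map ((fun i : Int => (i * bs, bs)) ∘ (fun k : Nat => (0 : Int) + (k : Int)))
        (List.range (total / bs).toNat) =
      List.map (fun (i : Nat) => ((0 : Int) + (i : Int) * bs, bs)) (List.range (total / bs).toNat) := by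
    apply List.map_congr_left
    intro i _
    simp only [Function.comp_apply, zero_add]
  rw [hm, hcast]
  split_ifs with hr
  · congr 1
    rw [zero_add]
  · rw [List.append_nil]

theorem build_fc2_eval_windows_spec : Claim_equal_build_fc2_eval_windows := by
  intro num_samples batch_size max_samples _
  unfold Spec_build_fc2_eval_windows build_fc2_eval_windows build_fc2_eval_windows_alt
  have hb : (1 : Int) ≤ max 1 batch_size := le_max_left 1 batch_size
  cases max_samples with
  | none =>
    simp only []
    rw [loop_closed (max 0 num_samples) (max 1 batch_size) (le_max_left 1 batch_size)
      (le_max_left 0 num_samples)]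
  | some m =>
    simp only []
    rw [loop_closed (min (max 0 num_samples) (max 0 m)) (max 1 batch_size) (le_max_left 1 batch_size)
      (le_min (le_max_left 0 num_samples) (le_max_left 0 m))]
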